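-- pv_equiv track=rewrite | github.com/specklesystems/speckle_systems-OSM_context | utils/utils_other.py | cut_off_non_numeric_string
-- ===== SOURCE A (Python) =====
-- def cut_off_non_numeric_string(text: str) -> str:
--     """Clean string from trailing non-numeric symbols.
--
--     Args:
--         text: original text.
--
--     Returns:
--         Text cleared of trailing symbols.
--     """
--     symbols = r"/[^\d.-]/g, ''"
--     text_part = text
--     for symb in symbols:
--         text_part = text_part.split(symb)[0]
--
--     new_text = ""
--     for part in text_part:
--         if part in "0123456789.":
--             new_text += part
--
--     return new_text
-- ===== SOURCE B (Python) =====
-- def cut_off_non_numeric_string(text: str) -> str: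
--     """One combined scan: stop at the first truncating symbol, keep digits."""
--     stop = set(r"/[^\d.-]/g, ''")
--     digits = []
--     for char in text:
--         if char in stop:
--             break
--         if char.isdigit():
--             digits.append(char)
--     return "".join(digits)
-- ===== Notes on version B (the rewrite author's own statement) =====
-- stated objective: simpler
-- what changed: Replaced the 14-fold repeated split(symb)[0] truncation pass plus a separate filtering pass with a single scan over the text that breaks at the first stop-set character and collects digits.
import Mathlib
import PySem

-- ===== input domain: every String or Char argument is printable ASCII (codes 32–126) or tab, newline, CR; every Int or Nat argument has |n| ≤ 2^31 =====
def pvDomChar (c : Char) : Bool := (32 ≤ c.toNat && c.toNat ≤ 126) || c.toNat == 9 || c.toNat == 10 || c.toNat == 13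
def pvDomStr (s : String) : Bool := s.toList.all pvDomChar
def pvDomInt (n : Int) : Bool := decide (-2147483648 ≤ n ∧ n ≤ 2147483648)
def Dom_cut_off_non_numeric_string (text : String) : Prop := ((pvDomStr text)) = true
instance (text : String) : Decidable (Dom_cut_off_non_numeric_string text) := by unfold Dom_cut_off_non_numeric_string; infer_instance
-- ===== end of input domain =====

-- B replaces A's 14 repeated split(symb)[0] passes + separate filter pass with one scan
-- that breaks at the first stop-set character and collects digits (return value only; no mutation).

-- ===== PORT A =====
-- the characters of A's literal r"/[^\d.-]/g, ''"
def pvSymbols : List Char := "/[^\\d.-]/g, ''".toList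
def pvKeep : List Char := "0123456789.".toList

def cut_off_non_numeric_string (text : String) : String :=
  -- for symb in symbols: text_part = text_part.split(symb)[0]   ([0] of a split is its head, always present)
  let text_part := pvSymbols.foldl
    (fun tp symb => (PySem.Chars.splitOn tp [symb]).headD []) text.toList
  -- for part in text_part: if part in "0123456789.": new_text += part
  let new_text := text_part.foldl
    (fun acc c => if c ∈ pvKeep then acc ++ [c] else acc) ([] : List Char)
  String.mk new_text

-- ===== PORT B =====
def pvStop : PySem.Set Char := PySem.Set.ofList "/[^\\d.-]/g, ''".toList

-- for char in text: if char in stop: break; if char.isdigit(): digits.append(char)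
def pvScanB : List Char → List Char
  | [] => []
  | c :: rest =>
    if c ∈ pvStop then []
    else if PySem.Chars.isdigit c then c :: pvScanB rest
    else pvScanB rest

def cut_off_non_numeric_string_alt (text : String) : String :=
  String.mk (pvScanB text.toList)

-- ===== PRECONDITION & SPEC =====
def Spec_cut_off_non_numeric_string (text : String) (out : String) : Prop := out = cut_off_non_numeric_string_alt text
instance (text : String) (out : String) : Decidable (Spec_cut_off_non_numeric_string text out) := by unfold Spec_cut_off_non_numeric_string; infer_instance

-- ===== CLAIM (what is proved, stated in full; the proofs are below) =====
def Claim_equal_cut_off_non_numeric_string : Prop := ∀ (text : String), Dom_cut_off_non_numeric_string text → Spec_cut_off_non_numeric_string text (cut_off_non_numeric_string text)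

-- ===== LEMMAS AND PROOFS =====

-- splitOn.go with a nonempty accumulator just prepends the reversed accumulator
theorem pv_go_acc (sep : List Char) : ∀ (fuel : Nat) (l cur : List Char) (acc : List (List Char)),
    PySem.Chars.splitOn.go sep fuel l cur acc
      = acc.reverse ++ PySem.Chars.splitOn.go sep fuel l cur [] := by
  intro fuel
  induction fuel with
  | zero => intro l cur acc; simp [PySem.Chars.splitOn.go]
  | succ n ih =>
    intro l cur acc
    cases l with
    | nil => simp [PySem.Chars.splitOn.go]
    | cons c rest =>
      by_cases h : sep.isPrefixOf (c :: rest)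
      · simp only [PySem.Chars.splitOn.go, h, if_true]
        rw [ih _ _ (cur.reverse :: acc), ih _ _ [cur.reverse]]
        simp
      · simp only [PySem.Chars.splitOn.go, h]
        exact ih _ _ acc

-- head of a single-character split is the prefix before the first occurrence of that character
theorem pv_go_head (a : Char) : ∀ (fuel : Nat) (l cur : List Char), l.length ≤ fuel →
    (PySem.Chars.splitOn.go [a] fuel l cur []).headD []
      = cur.reverse ++ l.takeWhile (fun c => !(c == a)) := by
  intro fuel
  induction fuel with
  | zero =>
    intro l cur h
    have : l = [] := List.eq_nil_of_length_eq_zero (Nat.le_zero.mp h)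
    subst this
    simp [PySem.Chars.splitOn.go]
  | succ n ih =>
    intro l cur h
    cases l with
    | nil => simp [PySem.Chars.splitOn.go]
    | cons c rest =>
      by_cases hc : c = a
      · subst hc
        have hpre : [c].isPrefixOf (c :: rest) = true := by simp [List.isPrefixOf]
        simp only [PySem.Chars.splitOn.go, hpre, if_true]
        rw [pv_go_acc]
        simp [List.takeWhile]
      · have hpre : [a].isPrefixOf (c :: rest) = false := by
          simp [List.isPrefixOf]; exact fun hh => (hc hh.symm).elim
        simp only [PySem.Chars.splitOn.go]
        rw [if_neg (by simp [hpre])]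
        rw [ih rest (c :: cur) (by simpa using Nat.le_of_succ_le_succ h)]
        have hb : (c == a) = false := by simp [hc]
        simp [List.takeWhile, hb]

theorem pv_split_head (a : Char) (l : List Char) :
    (PySem.Chars.splitOn l [a]).headD [] = l.takeWhile (fun c => !(c == a)) := by
  unfold PySem.Chars.splitOn
  simpa using pv_go_head a (l.length + 1) l [] (Nat.le_succ _)

-- folding the single-character truncations over a symbol list truncates at the first symbol occurrence
theorem pv_fold_split (syms : List Char) : ∀ (l : List Char),
    syms.foldl (fun tp symb => (PySem.Chars.splitOn tp [symb]).headD []) l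
      = l.takeWhile (fun c => !(syms.contains c)) := by
  induction syms with
  | nil => intro l; induction l with
    | nil => simp
    | cons c cs ih => simpa [List.takeWhile] using ih
  | cons s ss ih =>
    intro l
    rw [List.foldl_cons, pv_split_head, ih, List.takeWhile_takeWhile]
    congr 1
    funext c
    by_cases h1 : c = s <;> simp [h1]

-- a character outside the stop set is kept by A iff it is a digit ('.' is in the stop set)
theorem pv_keep_iff (c : Char) (h : pvSymbols.contains c = false) :
    (c ∈ pvKeep) ↔ PySem.Chars.isdigit c = true := by
  constructor
  · intro hk
    have : c = '0' ∨ c = '1' ∨ c = '2' ∨ c = '3' ∨ c = '4' ∨ c = '5' ∨ c = '6' ∨ c = '7' ∨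
        c = '8' ∨ c = '9' ∨ c = '.' := by
      simpa [pvKeep] using hk
    rcases this with h0|h0|h0|h0|h0|h0|h0|h0|h0|h0|h0 <;> subst h0 <;> first
      | decide
      | (exfalso; revert h; decide)
  · intro hd
    have h0 : '0' ≤ c ∧ c ≤ '9' := by
      simpa [PySem.Chars.isdigit] using hd
    have hlo : 48 ≤ c.toNat := h0.1
    have hhi : c.toNat ≤ 57 := h0.2
    have hn : c.toNat = 48 ∨ c.toNat = 49 ∨ c.toNat = 50 ∨ c.toNat = 51 ∨ c.toNat = 52 ∨
        c.toNat = 53 ∨ c.toNat = 54 ∨ c.toNat = 55 ∨ c.toNat = 56 ∨ c.toNat = 57 := by omega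
    have hc : c = Char.ofNat c.toNat := (Char.ofNat_toNat c).symm
    rcases hn with h0|h0|h0|h0|h0|h0|h0|h0|h0|h0 <;> rw [h0] at hc <;> subst hc <;> decide

-- B's scan equals: truncate at the first stop character, then keep A's kept characters
theorem pv_scan_eq : ∀ (cs : List Char),
    pvScanB cs = (cs.takeWhile (fun c => !(pvSymbols.contains c))).foldl
      (fun acc c => if c ∈ pvKeep then acc ++ [c] else acc) [] := by
  have key : ∀ cs, pvScanB cs
      = (cs.takeWhile (fun c => !(pvSymbols.contains c))).filter (fun c => decide (c ∈ pvKeep)) := by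
    intro cs
    induction cs with
    | nil => simp [pvScanB]
    | cons c rest ih =>
      by_cases hsp : c ∈ pvSymbols
      · have hmem : c ∈ pvStop := by
          simpa [pvStop, PySem.Set.mem_ofList, pvSymbols] using hsp
        simp [pvScanB, hmem, List.takeWhile, hsp]
      · have hnmem : c ∉ pvStop := by
          simpa [pvStop, PySem.Set.mem_ofList, pvSymbols] using hsp
        have hsf : pvSymbols.contains c = false := by simpa using hsp
        by_cases hd : PySem.Chars.isdigit c = true
        · have hk : c ∈ pvKeep := (pv_keep_iff c hsf).mpr hd
          simp [pvScanB, hnmem, hd, List.takeWhile, hsp, ih, hk]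
        · have hk : c ∉ pvKeep := fun hm => hd ((pv_keep_iff c hsf).mp hm)
          simp [pvScanB, hnmem, hd, List.takeWhile, hsp, ih, hk]
  intro cs
  rw [key, PySem.List.foldl_append_ite_eq_filter]
  simp

-- ===== VERDICT (by name: the statement is the Claim_ definition above) =====
theorem cut_off_non_numeric_string_spec : Claim_equal_cut_off_non_numeric_string := by
  intro text _
  unfold Spec_cut_off_non_numeric_string cut_off_non_numeric_string cut_off_non_numeric_string_alt
  rw [pv_fold_split, pv_scan_eq]
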